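-- pv_equiv track=rewrite | github.com/baylord1453/LivingBook | PlayReader2.py | find_preceding_dialogue
-- ===== SOURCE A (Python) =====
-- def find_preceding_dialogue(script, target_character, target_dialogue):
--     """
--     Finds the continuous dialogue of the character who spoke immediately before the target dialogue block.
--
--     Parameters:
--     script (dict): Parsed script with characters and their dialogues.
--     target_character (str): The character whose dialogue block is targeted.
--     target_dialogue (str): The specific dialogue block to find the preceding dialogue for.
--
--     Returns:
--     str: The preceding character's continuous dialogue block, or an empty string if not found.
--     """
--     previous_character = None
--     previous_dialogue = ""
--
--     for character, dialogues in script.items():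
--         for dialogue in dialogues:
--             if character == target_character and dialogue == target_dialogue:
--                 return previous_dialogue
--             previous_character = character
--             previous_dialogue = dialogue
--
--     return ""  # No preceding dialogue found
-- ===== SOURCE B (Python) =====
-- def find_preceding_dialogue(script, target_character, target_dialogue):
--     pairs = [(c, d) for c, ds in script.items() for d in ds]
--     try:
--         i = pairs.index((target_character, target_dialogue))
--     except ValueError:
--         return ""
--     return pairs[i - 1][1] if i > 0 else ""
-- ===== Notes on version B (the rewrite author's own statement) =====
-- stated objective: alternative
-- what changed: Replaces A's fused nested scan carrying a running previous-dialogue variable by a build-then-lookup: flatten the script to an ordered (character, dialogue) pair list, find the first index of the target pair with list.index, and return the dialogue at index i-1 (or "" if i == 0 or no match).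
import Mathlib
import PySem

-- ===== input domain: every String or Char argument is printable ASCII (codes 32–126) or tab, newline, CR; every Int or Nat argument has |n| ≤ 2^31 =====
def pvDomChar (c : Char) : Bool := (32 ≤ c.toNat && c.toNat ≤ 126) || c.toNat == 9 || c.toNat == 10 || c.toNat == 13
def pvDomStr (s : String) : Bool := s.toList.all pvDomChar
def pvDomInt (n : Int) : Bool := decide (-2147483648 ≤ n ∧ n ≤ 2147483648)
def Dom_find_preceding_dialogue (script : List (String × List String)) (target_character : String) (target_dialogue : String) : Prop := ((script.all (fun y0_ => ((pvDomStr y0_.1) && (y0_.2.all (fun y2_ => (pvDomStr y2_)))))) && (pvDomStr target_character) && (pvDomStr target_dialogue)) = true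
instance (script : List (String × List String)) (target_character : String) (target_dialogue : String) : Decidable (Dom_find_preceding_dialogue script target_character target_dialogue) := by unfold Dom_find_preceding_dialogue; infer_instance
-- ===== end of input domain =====

-- B replaces A's fused scan (running previous-dialogue variable) by flatten + first-index lookup; alternative decomposition, same cost.
-- ===== PORT A =====
-- inner 'for dialogue in dialogues' loop: returns (some result) on early return, else the updated previous_dialogue
def fpdInner (character target_character target_dialogue : String) : List String → String → Option String ⊕ String
  | [], prev => Sum.inr prev
  | d :: ds, prev =>
    if character == target_character && d == target_dialogue then Sum.inl (some prev)
    else fpdInner character target_character target_dialogue ds d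

-- outer 'for character, dialogues in script.items()' loop
def fpdOuter (target_character target_dialogue : String) : List (String × List String) → String → String
  | [], _ => ""
  | (c, ds) :: rest, prev =>
    match fpdInner c target_character target_dialogue ds prev with
    | Sum.inl (some r) => r
    | Sum.inl none => ""
    | Sum.inr prev' => fpdOuter target_character target_dialogue rest prev'

def find_preceding_dialogue (script : List (String × List String)) (target_character : String) (target_dialogue : String) : String :=
  fpdOuter target_character target_dialogue script ""

-- ===== PORT B =====
def find_preceding_dialogue_alt (script : List (String × List String)) (target_character : String) (target_dialogue : String) : String :=
  let pairs := script.flatMap (fun cd => cd.2.map (fun d => (cd.1, d)))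
  match PySem.List.index? pairs (target_character, target_dialogue) with
  | none => ""
  | some i => if 0 < i then ((PySem.List.pyGet? pairs ((i : Int) - 1)).map Prod.snd).getD "" else ""

-- ===== PRECONDITION & SPEC =====
def Spec_find_preceding_dialogue (script : List (String × List String)) (target_character : String) (target_dialogue : String) (out : String) : Prop := out = find_preceding_dialogue_alt script target_character target_dialogue
instance (script : List (String × List String)) (target_character : String) (target_dialogue : String) (out : String) : Decidable (Spec_find_preceding_dialogue script target_character target_dialogue out) := by unfold Spec_find_preceding_dialogue; infer_instance

-- ===== CLAIM (what is proved, stated in full; the proofs are below) =====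
def Claim_equal_find_preceding_dialogue : Prop := ∀ (script : List (String × List String)) (target_character : String) (target_dialogue : String), Dom_find_preceding_dialogue script target_character target_dialogue → Spec_find_preceding_dialogue script target_character target_dialogue (find_preceding_dialogue script target_character target_dialogue)

-- ===== LEMMAS AND PROOFS =====

-- A's behaviour re-stated over the flattened pair list
def scanFlat (tc td : String) : List (String × String) → String → String
  | [], _ => ""
  | (c, d) :: rest, prev =>
    if c == tc && d == td then prev else scanFlat tc td rest d

theorem inner_scan (c tc td : String) (ds : List String) (prev : String)
    (rest : List (String × String)) :
    (match fpdInner c tc td ds prev with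
     | Sum.inl (some r) => r
     | Sum.inl none => ""
     | Sum.inr prev' => scanFlat tc td rest prev') =
    scanFlat tc td (ds.map (fun d => (c, d)) ++ rest) prev := by
  induction ds generalizing prev with
  | nil => simp [fpdInner]
  | cons d ds ih =>
    simp only [fpdInner, List.map_cons, List.cons_append, scanFlat]
    by_cases h : (c == tc && d == td) = true
    · simp [h]
    · simp [h, ih]

theorem outer_eq_scanFlat (tc td : String) (script : List (String × List String)) (prev : String) :
    fpdOuter tc td script prev =
    scanFlat tc td (script.flatMap (fun cd => cd.2.map (fun d => (cd.1, d)))) prev := by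
  induction script generalizing prev with
  | nil => simp [fpdOuter, scanFlat]
  | cons cd rest ih =>
    obtain ⟨c, ds⟩ := cd
    simp only [List.flatMap_cons]
    rw [← inner_scan c tc td ds prev]
    cases h : fpdInner c tc td ds prev with
    | inl r => cases r <;> simp [fpdOuter, h]
    | inr prev' => simp [fpdOuter, h, ih]

theorem scanFlat_eq_index (tc td : String) (ps : List (String × String)) (prev : String) :
    scanFlat tc td ps prev =
    (match PySem.List.index? ps (tc, td) with
     | none => ""
     | some i => if 0 < i then ((PySem.List.pyGet? ps ((i : Int) - 1)).map Prod.snd).getD "" else prev) := by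
  induction ps generalizing prev with
  | nil => simp [scanFlat, PySem.List.index?]
  | cons p rest ih =>
    obtain ⟨c, d⟩ := p
    by_cases h : (c, d) = (tc, td)
    · obtain ⟨hc, hd⟩ := Prod.mk.inj h
      subst hc; subst hd
      rw [PySem.List.index?_cons_self]
      simp [scanFlat]
    · rw [PySem.List.index?_cons_of_ne rest h]
      have hb : (c == tc && d == td) = false := by
        by_contra hb
        apply h
        simp only [Bool.not_eq_false, Bool.and_eq_true, beq_iff_eq] at hb
        exact Prod.ext hb.1 hb.2
      simp only [scanFlat, hb, Bool.false_eq_true, if_false]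
      rw [ih d]
      cases hi : PySem.List.index? rest (tc, td) with
      | none => simp
      | some i =>
        simp only [Option.map_some]
        have hcast : ((i + 1 : Nat) : Int) - 1 = (i : Nat) := by push_cast; ring
        rw [hcast, PySem.List.pyGet?_natCast]
        cases i with
        | zero => simp
        | succ j =>
          have hcast2 : ((j + 1 : Nat) : Int) - 1 = (j : Nat) := by push_cast; ring
          rw [hcast2, PySem.List.pyGet?_natCast]
          simp

-- ===== VERDICT (by name: the statement is the Claim_ definition above) =====
theorem find_preceding_dialogue_spec : Claim_equal_find_preceding_dialogue := by
  intro script tc td _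
  unfold Spec_find_preceding_dialogue find_preceding_dialogue find_preceding_dialogue_alt
  rw [outer_eq_scanFlat, scanFlat_eq_index]
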